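-- pv_equiv track=rewrite | github.com/CaeL09/System-Component-Insight | frontend_streamlit/Home.py | generate_dynamic_summary
-- ===== SOURCE A (Python) =====
-- def generate_dynamic_summary(data):
--     """Generate a dynamic summary report of the status categorized by method name."""
--     summary = {}
--     for item in data:
--         method = item.get("method", "Unknown")
--         status = item.get("status", "Unknown")
--         if method not in summary:
--             summary[method] = {}
--         if status not in summary[method]:
--             summary[method][status] = 0
--         summary[method][status] += 1
--     return summary
-- ===== SOURCE B (Python) =====
-- def generate_dynamic_summary(data):
--     """Generate a dynamic summary report of the status categorized by method name."""
--     # Pass 1: flat tally over (method, status) pairs.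
--     counts = {}
--     for item in data:
--         key = (item.get("method", "Unknown"), item.get("status", "Unknown"))
--         counts[key] = counts.get(key, 0) + 1
--     # Pass 2: reshape the flat tally into the nested {method: {status: count}} dict.
--     summary = {}
--     for (method, status), count in counts.items():
--         summary.setdefault(method, {})[status] = count
--     return summary
-- ===== Notes on version B (the rewrite author's own statement) =====
-- stated objective: idiomatic
-- what changed: B first builds one flat tally keyed by (method, status) tuples in a single pass, then reshapes that flat counter into the nested {method: {status: count}} dict with setdefault, instead of A's incremental nested-dict construction with membership tests and in-place increments.
import Mathlib
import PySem

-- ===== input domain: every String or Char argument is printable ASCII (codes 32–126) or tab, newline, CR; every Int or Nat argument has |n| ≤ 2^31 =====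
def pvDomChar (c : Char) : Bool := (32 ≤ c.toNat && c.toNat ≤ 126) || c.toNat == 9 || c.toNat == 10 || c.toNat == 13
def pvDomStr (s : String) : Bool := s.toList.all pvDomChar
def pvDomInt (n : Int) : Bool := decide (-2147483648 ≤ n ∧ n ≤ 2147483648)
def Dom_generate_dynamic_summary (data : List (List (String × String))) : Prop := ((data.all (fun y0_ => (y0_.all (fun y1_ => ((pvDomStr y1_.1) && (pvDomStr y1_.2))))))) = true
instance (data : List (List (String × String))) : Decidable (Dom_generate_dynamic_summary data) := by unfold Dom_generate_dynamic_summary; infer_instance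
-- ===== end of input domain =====

-- B builds a flat (method, status) tally in one pass and then reshapes it into the nested
-- summary dict with setdefault, instead of A's incremental nested-dict construction.


-- ===== PORT A =====
-- one iteration of A's loop body (summary[method][status] += 1 with the two membership guards)
def pvA_step (summary : PySem.Dict String (PySem.Dict String Int))
    (item : List (String × String)) : PySem.Dict String (PySem.Dict String Int) :=
  let method := (PySem.Dict.mk item).getD "method" "Unknown"
  let status := (PySem.Dict.mk item).getD "status" "Unknown"
  let summary := if summary.contains method then summary else summary.insert method PySem.Dict.empty
  let inner := summary.getD method PySem.Dict.empty
  let inner := if inner.contains status then inner else inner.insert status 0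
  let inner := inner.insert status (inner.getD status 0 + 1)
  summary.insert method inner

def generate_dynamic_summary (data : List (List (String × String))) : List (String × List (String × Int)) :=
  (data.foldl pvA_step PySem.Dict.empty).items.map (fun p => (p.1, p.2.items))

-- ===== PORT B =====
-- pass 1: one step of the flat tally (counts[key] = counts.get(key, 0) + 1)
def pvB_count (c : PySem.Dict (String × String) Int)
    (item : List (String × String)) : PySem.Dict (String × String) Int :=
  let key := ((PySem.Dict.mk item).getD "method" "Unknown", (PySem.Dict.mk item).getD "status" "Unknown")
  c.insert key (c.getD key 0 + 1)

-- pass 2: one step of the reshape (summary.setdefault(method, {})[status] = count)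
def pvB_step (s : PySem.Dict String (PySem.Dict String Int))
    (q : (String × String) × Int) : PySem.Dict String (PySem.Dict String Int) :=
  let s := s.setdefault q.1.1 PySem.Dict.empty
  s.insert q.1.1 ((s.getD q.1.1 PySem.Dict.empty).insert q.1.2 q.2)

def generate_dynamic_summary_alt (data : List (List (String × String))) : List (String × List (String × Int)) :=
  let counts := data.foldl pvB_count PySem.Dict.empty
  ((counts.items).foldl pvB_step PySem.Dict.empty).items.map (fun p => (p.1, p.2.items))

-- ===== PRECONDITION & SPEC =====
def Spec_generate_dynamic_summary (data : List (List (String × String))) (out : List (String × List (String × Int))) : Prop := out = generate_dynamic_summary_alt data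
instance (data : List (List (String × String))) (out : List (String × List (String × Int))) : Decidable (Spec_generate_dynamic_summary data out) := by unfold Spec_generate_dynamic_summary; infer_instance

-- ===== CLAIM (what is proved, stated in full; the proofs are below) =====
def Claim_equal_generate_dynamic_summary : Prop := ∀ (data : List (List (String × String))), Dom_generate_dynamic_summary data → Spec_generate_dynamic_summary data (generate_dynamic_summary data)

-- ===== LEMMAS AND PROOFS =====

-- the (method, status) pair of an item
def pvKey (item : List (String × String)) : String × String :=
  ((PySem.Dict.mk item).getD "method" "Unknown", (PySem.Dict.mk item).getD "status" "Unknown")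

-- A's loop body on the extracted pair (definitionally pvA_step)
def pvA_core (d : PySem.Dict String (PySem.Dict String Int)) (k : String × String) :
    PySem.Dict String (PySem.Dict String Int) :=
  let d := if d.contains k.1 then d else d.insert k.1 PySem.Dict.empty
  let inner := d.getD k.1 PySem.Dict.empty
  let inner := if inner.contains k.2 then inner else inner.insert k.2 0
  let inner := inner.insert k.2 (inner.getD k.2 0 + 1)
  d.insert k.1 inner

-- A's effect on the inner dict of one method
def pvInner (i : PySem.Dict String Int) (σ : String) : PySem.Dict String Int :=
  let i := if i.contains σ then i else i.insert σ 0
  i.insert σ (i.getD σ 0 + 1)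

-- Set.add via plain membership
theorem pv_set_add {α : Type} [BEq α] [LawfulBEq α] (s : PySem.Set α) (x : α) :
    PySem.Set.add s x = if x ∈ s then s else s ++ [x] := by
  show (if s.contains x then s else s ++ [x]) = _
  by_cases h : x ∈ s <;> simp [PySem.Set.contains, h]

-- keys of one A step
theorem pvA_core_keys (d : PySem.Dict String (PySem.Dict String Int)) (k : String × String) :
    (pvA_core d k).keys = PySem.Set.add d.keys k.1 := by
  rw [pv_set_add]
  by_cases h : d.contains k.1 = true
  · have hm : k.1 ∈ d.keys := (PySem.Dict.contains_iff_mem_keys d k.1).mp h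
    simp only [pvA_core, h, if_true, hm]
    exact PySem.Dict.keys_insert_of_contains d _ h
  · have hb : d.contains k.1 = false := by simpa using h
    have hm : ¬ k.1 ∈ d.keys := fun hmem => h ((PySem.Dict.contains_iff_mem_keys d k.1).mpr hmem)
    simp only [pvA_core, hb, Bool.false_eq_true, if_false, hm]
    rw [PySem.Dict.keys_insert_of_contains _ _ (PySem.Dict.contains_insert_self d k.1 PySem.Dict.empty),
        PySem.Dict.keys_insert_of_not_contains d _ hb]

theorem pvInner_keys (i : PySem.Dict String Int) (σ : String) :
    (pvInner i σ).keys = PySem.Set.add i.keys σ := by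
  rw [pv_set_add]
  by_cases h : i.contains σ = true
  · have hm : σ ∈ i.keys := (PySem.Dict.contains_iff_mem_keys i σ).mp h
    simp only [pvInner, h, if_true, hm]
    exact PySem.Dict.keys_insert_of_contains i _ h
  · have hb : i.contains σ = false := by simpa using h
    have hm : ¬ σ ∈ i.keys := fun hmem => h ((PySem.Dict.contains_iff_mem_keys i σ).mpr hmem)
    simp only [pvInner, hb, Bool.false_eq_true, if_false, hm]
    rw [PySem.Dict.keys_insert_of_contains _ _ (PySem.Dict.contains_insert_self i σ 0),
        PySem.Dict.keys_insert_of_not_contains i _ hb]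

theorem pvB_step_keys (s : PySem.Dict String (PySem.Dict String Int)) (q : (String × String) × Int) :
    (pvB_step s q).keys = PySem.Set.add s.keys q.1.1 := by
  rw [pv_set_add]
  by_cases h : s.contains q.1.1 = true
  · have hm : q.1.1 ∈ s.keys := (PySem.Dict.contains_iff_mem_keys s q.1.1).mp h
    simp only [pvB_step, PySem.Dict.setdefault_of_contains s _ h, hm, if_true]
    exact PySem.Dict.keys_insert_of_contains s _ h
  · have hb : s.contains q.1.1 = false := by simpa using h
    have hm : ¬ q.1.1 ∈ s.keys := fun hmem => h ((PySem.Dict.contains_iff_mem_keys s q.1.1).mpr hmem)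
    simp only [pvB_step, PySem.Dict.setdefault_of_not_contains s _ hb, hm, if_false]
    rw [PySem.Dict.keys_insert_of_contains _ _ (PySem.Dict.contains_insert_self s q.1.1 PySem.Dict.empty),
        PySem.Dict.keys_insert_of_not_contains s _ hb]

-- keys of the folds
theorem pvA_fold_keys (ks : List (String × String)) :
    ∀ d : PySem.Dict String (PySem.Dict String Int),
      (ks.foldl pvA_core d).keys = List.foldl PySem.Set.add d.keys (ks.map (·.1)) := by
  induction ks with
  | nil => intro d; simp
  | cons k t ih => intro d; simp only [List.foldl_cons, List.map_cons]; rw [ih, pvA_core_keys]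

theorem pvInner_fold_keys (l : List String) :
    ∀ i : PySem.Dict String Int,
      (l.foldl pvInner i).keys = List.foldl PySem.Set.add i.keys l := by
  induction l with
  | nil => intro i; simp
  | cons s t ih => intro i; simp only [List.foldl_cons]; rw [ih, pvInner_keys]

theorem pvB_fold_keys (L : List ((String × String) × Int)) :
    ∀ s : PySem.Dict String (PySem.Dict String Int),
      (L.foldl pvB_step s).keys = List.foldl PySem.Set.add s.keys (L.map (·.1.1)) := by
  induction L with
  | nil => intro s; simp
  | cons q t ih => intro s; simp only [List.foldl_cons, List.map_cons]; rw [ih, pvB_step_keys]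

-- getD of the setdefault at its own key
theorem pv_getD_setdefault_self (d : PySem.Dict String (PySem.Dict String Int)) (k : String) :
    (d.setdefault k PySem.Dict.empty).getD k PySem.Dict.empty = d.getD k PySem.Dict.empty := by
  rw [PySem.Dict.getD_eq_get?_getD, PySem.Dict.get?_setdefault_self, PySem.Dict.getD_eq_get?_getD]
  cases d.get? k <;> simp

-- getD of one A step
theorem pvA_core_getD (d : PySem.Dict String (PySem.Dict String Int)) (k : String × String) (m : String) :
    (pvA_core d k).getD m PySem.Dict.empty =
      if k.1 = m then pvInner (d.getD m PySem.Dict.empty) k.2 else d.getD m PySem.Dict.empty := by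
  have h1 : (if d.contains k.1 then d else d.insert k.1 PySem.Dict.empty).getD k.1 PySem.Dict.empty
      = d.getD k.1 PySem.Dict.empty := by
    by_cases h : d.contains k.1 = true
    · simp [h]
    · have hb : d.contains k.1 = false := by simpa using h
      simp [hb, PySem.Dict.getD_insert_self, PySem.Dict.getD_of_not_contains d _ hb]
  by_cases hm : k.1 = m
  · subst hm
    simp only [pvA_core, pvInner, if_true]
    rw [PySem.Dict.getD_insert_self, h1]
  · simp only [pvA_core, hm, if_false]
    rw [PySem.Dict.getD_insert_of_ne _ _ _ (Ne.symm hm)]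
    by_cases h : d.contains k.1 = true
    · simp [h]
    · have hb : d.contains k.1 = false := by simpa using h
      simp [hb, PySem.Dict.getD_insert_of_ne _ _ _ (Ne.symm hm)]

-- getD of one B step
theorem pvB_step_getD (s : PySem.Dict String (PySem.Dict String Int)) (q : (String × String) × Int) (m : String) :
    (pvB_step s q).getD m PySem.Dict.empty =
      if q.1.1 = m then (s.getD m PySem.Dict.empty).insert q.1.2 q.2 else s.getD m PySem.Dict.empty := by
  by_cases hm : q.1.1 = m
  · subst hm
    simp only [pvB_step, if_true]
    rw [PySem.Dict.getD_insert_self, pv_getD_setdefault_self]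
  · simp only [pvB_step, hm, if_false]
    rw [PySem.Dict.getD_insert_of_ne _ _ _ (Ne.symm hm)]
    by_cases h : s.contains q.1.1 = true
    · rw [PySem.Dict.setdefault_of_contains s _ h]
    · have hb : s.contains q.1.1 = false := by simpa using h
      rw [PySem.Dict.setdefault_of_not_contains s _ hb,
          PySem.Dict.getD_insert_of_ne _ _ _ (Ne.symm hm)]

-- getD of the folds
theorem pvA_fold_getD (ks : List (String × String)) :
    ∀ (d : PySem.Dict String (PySem.Dict String Int)) (m : String),
      (ks.foldl pvA_core d).getD m PySem.Dict.empty =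
        ((ks.filter (fun p => p.1 == m)).map (·.2)).foldl pvInner (d.getD m PySem.Dict.empty) := by
  induction ks with
  | nil => intro d m; simp
  | cons k t ih =>
    intro d m
    simp only [List.foldl_cons, List.filter_cons]
    by_cases hm : k.1 = m
    · simp only [hm, beq_self_eq_true, if_true, List.map_cons, List.foldl_cons]
      rw [ih, pvA_core_getD]
      simp [hm]
    · have : (k.1 == m) = false := by simpa using hm
      simp only [this, Bool.false_eq_true, if_false]
      rw [ih, pvA_core_getD]
      simp [hm]

theorem pvB_fold_getD (L : List ((String × String) × Int)) :
    ∀ (s : PySem.Dict String (PySem.Dict String Int)) (m : String),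
      (L.foldl pvB_step s).getD m PySem.Dict.empty =
        (L.filter (fun q => q.1.1 == m)).foldl (fun i q => i.insert q.1.2 q.2) (s.getD m PySem.Dict.empty) := by
  induction L with
  | nil => intro s m; simp
  | cons q t ih =>
    intro s m
    simp only [List.foldl_cons, List.filter_cons]
    by_cases hm : q.1.1 = m
    · simp only [hm, beq_self_eq_true, if_true, List.foldl_cons]
      rw [ih, pvB_step_getD]
      simp [hm]
    · have : (q.1.1 == m) = false := by simpa using hm
      simp only [this, Bool.false_eq_true, if_false]
      rw [ih, pvB_step_getD]
      simp [hm]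

-- counts inside the inner fold
theorem pvInner_fold_count (l : List String) :
    ∀ (i : PySem.Dict String Int) (σ : String),
      (l.foldl pvInner i).getD σ 0 = i.getD σ 0 + (l.count σ : Int) := by
  induction l with
  | nil => intro i σ; simp
  | cons s t ih =>
    intro i σ
    simp only [List.foldl_cons]
    rw [ih]
    by_cases hs : s = σ
    · subst hs
      have h1 : (pvInner i s).getD s 0 = i.getD s 0 + 1 := by
        have hi : (if i.contains s then i else i.insert s 0).getD s 0 = i.getD s 0 := by
          by_cases h : i.contains s = true
          · simp [h]
          · have hb : i.contains s = false := by simpa using h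
            simp [hb, PySem.Dict.getD_insert_self, PySem.Dict.getD_of_not_contains i _ hb]
        simp only [pvInner]
        rw [PySem.Dict.getD_insert_self, hi]
      rw [h1, List.count_cons_self]
      push_cast
      ring
    · have h1 : (pvInner i s).getD σ 0 = i.getD σ 0 := by
        simp only [pvInner]
        rw [PySem.Dict.getD_insert_of_ne _ _ _ (Ne.symm hs)]
        by_cases h : i.contains s = true
        · simp [h]
        · have hb : i.contains s = false := by simpa using h
          simp [hb, PySem.Dict.getD_insert_of_ne _ _ _ (Ne.symm hs)]
      have h2 : (σ == s) = false := by simpa using fun he => hs he.symm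
      rw [h1]; simp [List.count_cons, h2]; exact hs

theorem pv_ofList_append_singleton {α : Type} [BEq α] [LawfulBEq α] (l : List α) (x : α) :
    PySem.Set.ofList (l ++ [x]) = if x ∈ l then PySem.Set.ofList l else PySem.Set.ofList l ++ [x] := by
  rw [PySem.Set.ofList_eq_foldl, List.foldl_append, ← PySem.Set.ofList_eq_foldl]
  simp only [List.foldl_cons, List.foldl_nil]
  rw [pv_set_add]
  simp [PySem.Set.mem_ofList]

theorem pv_ofList_filter {α : Type} [BEq α] [LawfulBEq α] (p : α → Bool) (l : List α) :
    (PySem.Set.ofList l).filter p = PySem.Set.ofList (l.filter p) := by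
  induction l using List.reverseRecOn with
  | nil => rfl
  | append_singleton l x ih =>
    rw [pv_ofList_append_singleton, List.filter_append]
    by_cases hx : x ∈ l
    · simp only [hx, if_true]
      by_cases hp : p x = true
      · have hfx : List.filter p [x] = [x] := by simp [hp]
        rw [hfx, ih, pv_ofList_append_singleton]
        have hm : x ∈ l.filter p := List.mem_filter.mpr ⟨hx, hp⟩
        simp [hm]
      · have hfx : List.filter p [x] = [] := by
          simp [List.filter_cons, hp]
        simp [hfx, ih]
    · simp only [hx, if_false]
      rw [List.filter_append, ih]
      by_cases hp : p x = true
      · have hfx : List.filter p [x] = [x] := by simp [hp]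
        rw [hfx, pv_ofList_append_singleton]
        have hm : ¬ x ∈ l.filter p := fun h => hx (List.mem_filter.mp h).1
        simp [hm]
      · have hfx : List.filter p [x] = [] := by simp [List.filter_cons, hp]
        simp [hfx]

theorem pv_ofList_map_ofList {α β : Type} [BEq α] [LawfulBEq α] [BEq β] [LawfulBEq β]
    (f : α → β) (l : List α) :
    PySem.Set.ofList ((PySem.Set.ofList l).map f) = PySem.Set.ofList (l.map f) := by
  induction l using List.reverseRecOn with
  | nil => rfl
  | append_singleton l x ih =>
    by_cases hx : x ∈ l
    · rw [pv_ofList_append_singleton]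
      simp only [hx, if_true]
      rw [ih, List.map_append, show List.map f [x] = [f x] from rfl, pv_ofList_append_singleton]
      have hfx : f x ∈ l.map f := List.mem_map_of_mem hx
      simp [hfx]
    · rw [pv_ofList_append_singleton]
      simp only [hx, if_false]
      rw [List.map_append, show List.map f [x] = [f x] from rfl, pv_ofList_append_singleton,
          List.map_append, show List.map f [x] = [f x] from rfl, pv_ofList_append_singleton, ← ih]
      have hiff : (f x ∈ (PySem.Set.ofList l).map f) ↔ (f x ∈ l.map f) := by
        simp [List.mem_map, PySem.Set.mem_ofList]
      by_cases hf : f x ∈ l.map f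
      · simp [hf, hiff.mpr hf]
      · simp only [hf, if_false, fun h => hf (hiff.mp h)]
        have h2 : ∀ y ∈ l, ¬ f y = f x := fun y hy he => hf (he ▸ List.mem_map_of_mem hy)
        simp [hf]
        exact h2

theorem pv_map_ofList_injOn {α β : Type} [BEq α] [LawfulBEq α] [BEq β] [LawfulBEq β]
    (f : α → β) (l : List α)
    (hinj : ∀ x ∈ l, ∀ y ∈ l, f x = f y → x = y) :
    (PySem.Set.ofList l).map f = PySem.Set.ofList (l.map f) := by
  induction l using List.reverseRecOn with
  | nil => rfl
  | append_singleton l x ih =>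
    have hinj' : ∀ a ∈ l, ∀ b ∈ l, f a = f b → a = b := fun a ha b hb =>
      hinj a (by simp [ha]) b (by simp [hb])
    by_cases hx : x ∈ l
    · rw [pv_ofList_append_singleton]
      simp only [hx, if_true]
      rw [ih hinj', List.map_append, show List.map f [x] = [f x] from rfl,
          pv_ofList_append_singleton]
      have hfx : f x ∈ l.map f := List.mem_map_of_mem hx
      simp [hfx]
    · rw [pv_ofList_append_singleton]
      simp only [hx, if_false]
      rw [List.map_append, show List.map f [x] = [f x] from rfl, List.map_append,
          show List.map f [x] = [f x] from rfl, pv_ofList_append_singleton, ← ih hinj']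
      have hfx : ¬ f x ∈ l.map f := by
        intro h
        obtain ⟨y, hy, hfy⟩ := List.mem_map.mp h
        have : y = x := hinj y (by simp [hy]) x (by simp) hfy
        exact hx (this ▸ hy)
      simp [hfx]

theorem pv_count_snd (ks : List (String × String)) (m σ : String) :
    ((ks.filter (fun p => p.1 == m)).map (·.2)).count σ = ks.count (m, σ) := by
  induction ks with
  | nil => rfl
  | cons p t ih =>
    obtain ⟨a, b⟩ := p
    simp only [List.filter_cons]
    by_cases h1 : a = m <;> by_cases h2 : b = σ <;>
      simp [h1, h2, List.count_cons, ih, Prod.ext_iff]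



-- the two inner dicts of one method agree
theorem pv_inner_eq (ks : List (String × String)) (m : String) :
    ((ks.filter (fun p => p.1 == m)).map (·.2)).foldl pvInner PySem.Dict.empty =
    ((PySem.Dict.counter ks).items.filter (fun q => q.1.1 == m)).foldl
      (fun i q => i.insert q.1.2 q.2) PySem.Dict.empty := by
  have hinj : ∀ x ∈ ks.filter (fun p => p.1 == m), ∀ y ∈ ks.filter (fun p => p.1 == m),
      x.2 = y.2 → x = y := by
    intro x hx y hy h2
    have hx1 : x.1 = m := by simpa using (List.mem_filter.mp hx).2
    have hy1 : y.1 = m := by simpa using (List.mem_filter.mp hy).2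
    exact Prod.ext_iff.mpr ⟨hx1.trans hy1.symm, h2⟩
  have hmap : (PySem.Set.ofList (ks.filter (fun p => p.1 == m))).map (·.2)
      = PySem.Set.ofList ((ks.filter (fun p => p.1 == m)).map (·.2)) :=
    pv_map_ofList_injOn _ _ hinj
  -- RHS filtered list
  have hflt : (PySem.Dict.counter ks).items.filter (fun q => q.1.1 == m)
      = (PySem.Set.ofList (ks.filter (fun p => p.1 == m))).map
          (fun k => (k, (List.count k ks : Int))) := by
    rw [PySem.Dict.items_counter, List.filter_map]
    have hcomp : ((fun q : (String × String) × Int => q.1.1 == m) ∘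
        (fun k : String × String => (k, (List.count k ks : Int))))
        = (fun k : String × String => k.1 == m) := rfl
    rw [hcomp, pv_ofList_filter]
  -- RHS items
  have hfresh : ∀ a ∈ ((PySem.Set.ofList (ks.filter (fun p => p.1 == m))).map
      (fun k => (k, (List.count k ks : Int)))),
      (PySem.Dict.empty : PySem.Dict String Int).contains a.1.2 = false :=
    fun a _ => PySem.Dict.contains_empty _
  have hnodup : (((PySem.Set.ofList (ks.filter (fun p => p.1 == m))).map
      (fun k => (k, (List.count k ks : Int)))).map (fun q => q.1.2)).Nodup := by
    rw [List.map_map]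
    have : ((fun q : (String × String) × Int => q.1.2) ∘
        (fun k : String × String => (k, (List.count k ks : Int))))
        = (fun k : String × String => k.2) := rfl
    rw [this, hmap]
    exact PySem.Set.nodup_ofList _
  have hB : (((PySem.Dict.counter ks).items.filter (fun q => q.1.1 == m)).foldl
      (fun i q => i.insert q.1.2 q.2) PySem.Dict.empty).items
      = (PySem.Set.ofList (ks.filter (fun p => p.1 == m))).map
          (fun k => (k.2, (List.count k ks : Int))) := by
    rw [hflt]
    have := PySem.Dict.items_foldl_insert_fresh
      ((PySem.Set.ofList (ks.filter (fun p => p.1 == m))).map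
        (fun k => (k, (List.count k ks : Int))))
      (fun q => q.1.2) (fun q => q.2) PySem.Dict.empty hfresh hnodup
    simpa [List.map_map] using this
  -- LHS items
  have hkeysL : ((((ks.filter (fun p => p.1 == m)).map (·.2)).foldl pvInner
      PySem.Dict.empty)).keys = PySem.Set.ofList ((ks.filter (fun p => p.1 == m)).map (·.2)) := by
    rw [pvInner_fold_keys, PySem.Dict.keys_empty, ← PySem.Set.ofList_eq_foldl]
  have hndL : ((((ks.filter (fun p => p.1 == m)).map (·.2)).foldl pvInner
      PySem.Dict.empty)).keys.Nodup := by
    rw [hkeysL]; exact PySem.Set.nodup_ofList _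
  apply PySem.Dict.ext
  rw [hB, PySem.Dict.items_eq_map_keys _ hndL 0, hkeysL, ← hmap, List.map_map]
  apply List.map_congr_left
  intro k hk
  have hk' : k ∈ ks.filter (fun p => p.1 == m) := (PySem.Set.mem_ofList _ _).mp hk
  have hk1 : k.1 = m := by simpa using (List.mem_filter.mp hk').2
  have hcnt : (((ks.filter (fun p => p.1 == m)).map (·.2)).count k.2 : Int)
      = (List.count k ks : Int) := by
    rw [pv_count_snd]
    have : (m, k.2) = k := Prod.ext_iff.mpr ⟨hk1.symm, rfl⟩
    rw [this]
  simp only [Function.comp]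
  rw [pvInner_fold_count, PySem.Dict.getD_empty, zero_add, hcnt]

-- the full nested dicts agree
theorem pv_main (ks : List (String × String)) :
    ks.foldl pvA_core PySem.Dict.empty =
    (PySem.Dict.counter ks).items.foldl pvB_step PySem.Dict.empty := by
  have hkA : (ks.foldl pvA_core PySem.Dict.empty).keys
      = PySem.Set.ofList (ks.map (·.1)) := by
    rw [pvA_fold_keys, PySem.Dict.keys_empty, ← PySem.Set.ofList_eq_foldl]
  have hkB : ((PySem.Dict.counter ks).items.foldl pvB_step PySem.Dict.empty).keys
      = PySem.Set.ofList (ks.map (·.1)) := by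
    rw [pvB_fold_keys, PySem.Dict.keys_empty, ← PySem.Set.ofList_eq_foldl,
        PySem.Dict.items_counter, List.map_map]
    have hcomp : ((fun q : (String × String) × Int => q.1.1) ∘
        (fun k : String × String => (k, (List.count k ks : Int))))
        = (fun k : String × String => k.1) := rfl
    rw [hcomp, pv_ofList_map_ofList]
  apply PySem.Dict.ext
  rw [PySem.Dict.items_eq_map_keys _ (by rw [hkA]; exact PySem.Set.nodup_ofList _) PySem.Dict.empty,
      PySem.Dict.items_eq_map_keys _ (by rw [hkB]; exact PySem.Set.nodup_ofList _) PySem.Dict.empty,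
      hkA, hkB]
  apply List.map_congr_left
  intro m _
  refine congrArg (fun z => (m, z)) ?_
  rw [pvA_fold_getD, pvB_fold_getD]
  exact pv_inner_eq ks m

theorem pv_final (data : List (List (String × String))) :
    (data.foldl pvA_step PySem.Dict.empty).items.map (fun p => (p.1, p.2.items))
    = (((data.foldl pvB_count PySem.Dict.empty).items).foldl pvB_step
        PySem.Dict.empty).items.map (fun p => (p.1, p.2.items)) := by
  have h1 : data.foldl pvA_step PySem.Dict.empty
      = (data.map pvKey).foldl pvA_core PySem.Dict.empty := by
    rw [List.foldl_map]; rfl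
  have h2 : data.foldl pvB_count PySem.Dict.empty
      = PySem.Dict.counter (data.map pvKey) := by
    rw [← PySem.Dict.foldl_insert_getD_add_one_eq_counter (data.map pvKey), List.foldl_map]; rfl
  rw [h1, h2, pv_main]

-- ===== VERDICT (by name: the statement is the Claim_ definition above) =====
theorem generate_dynamic_summary_spec : Claim_equal_generate_dynamic_summary := by
  intro data _
  unfold Spec_generate_dynamic_summary generate_dynamic_summary generate_dynamic_summary_alt
  exact pv_final data
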